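-- pv_equiv track=rewrite | github.com/Alisher-Bulatov/pci-compliance-agent | tools/search_by_topic.py | extract_query_tags
-- ===== SOURCE A (Python) =====
-- def extract_query_tags(query):
--     lowered = query.lower()
--     tags = []
--     if any(word in lowered for word in ["encrypt", "crypto", "key"]):
--         tags.append("encryption")
--     if any(word in lowered for word in ["auth", "password", "login"]):
--         tags.append("authentication")
--     if any(word in lowered for word in ["store", "retain", "database"]):
--         tags.append("storage")
--     if any(word in lowered for word in ["firewall", "network", "router"]):
--         tags.append("network")
--     if "compliance" in lowered or "audit" in lowered:
--         tags.append("compliance")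
--     return tags
-- ===== SOURCE B (Python) =====
-- KEYWORD_TAGS = [
--     ("encrypt", "encryption"), ("crypto", "encryption"), ("key", "encryption"),
--     ("auth", "authentication"), ("password", "authentication"), ("login", "authentication"),
--     ("store", "storage"), ("retain", "storage"), ("database", "storage"),
--     ("firewall", "network"), ("network", "network"), ("router", "network"),
--     ("compliance", "compliance"), ("audit", "compliance"),
-- ]
--
-- TAG_ORDER = ["encryption", "authentication", "storage", "network", "compliance"]
--
--
-- def extract_query_tags(query):
--     # Single left-to-right scan over the text: at each position, record which
--     # keywords start there; then emit the matched tags in the fixed order.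
--     lowered = query.lower()
--     found = set()
--     for i in range(len(lowered)):
--         for kw, tag in KEYWORD_TAGS:
--             if lowered.startswith(kw, i):
--                 found.add(tag)
--     return [tag for tag in TAG_ORDER if tag in found]
-- ===== Notes on version B (the rewrite author's own statement) =====
-- stated objective: alternative
-- what changed: Instead of running a separate substring search per keyword, B makes one left-to-right scan over the lowered query, at each position recording into a set the tags of keywords that start there, then emits the matched tags in the fixed order.
import Mathlib
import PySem

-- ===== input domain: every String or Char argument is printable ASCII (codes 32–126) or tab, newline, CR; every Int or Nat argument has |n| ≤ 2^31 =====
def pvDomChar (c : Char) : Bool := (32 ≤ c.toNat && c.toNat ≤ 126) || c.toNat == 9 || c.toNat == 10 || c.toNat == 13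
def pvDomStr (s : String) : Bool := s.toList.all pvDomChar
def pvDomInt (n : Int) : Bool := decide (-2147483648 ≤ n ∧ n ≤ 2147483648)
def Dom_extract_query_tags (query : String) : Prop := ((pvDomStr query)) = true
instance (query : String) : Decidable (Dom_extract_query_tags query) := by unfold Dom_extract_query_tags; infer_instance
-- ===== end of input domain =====

-- B replaces A's per-keyword substring searches by ONE left-to-right scan over the
-- lowered query that records, at each position, the tags of keywords starting there
-- into a set, then emits the matched tags in the fixed order (objective: alternative).

-- ===== PORT A =====
def extract_query_tags (query : String) : List String :=
  let lowered := PySem.Str.lower query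
  let tags : List String := []
  let tags := if (["encrypt", "crypto", "key"] : List String).any
      (fun word => PySem.Str.isIn word lowered) then tags ++ ["encryption"] else tags
  let tags := if (["auth", "password", "login"] : List String).any
      (fun word => PySem.Str.isIn word lowered) then tags ++ ["authentication"] else tags
  let tags := if (["store", "retain", "database"] : List String).any
      (fun word => PySem.Str.isIn word lowered) then tags ++ ["storage"] else tags
  let tags := if (["firewall", "network", "router"] : List String).any
      (fun word => PySem.Str.isIn word lowered) then tags ++ ["network"] else tags
  let tags := if PySem.Str.isIn "compliance" lowered || PySem.Str.isIn "audit" lowered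
      then tags ++ ["compliance"] else tags
  tags

-- ===== PORT B =====
def pvKeywordTags : List (String × String) :=
  [("encrypt", "encryption"), ("crypto", "encryption"), ("key", "encryption"),
   ("auth", "authentication"), ("password", "authentication"), ("login", "authentication"),
   ("store", "storage"), ("retain", "storage"), ("database", "storage"),
   ("firewall", "network"), ("network", "network"), ("router", "network"),
   ("compliance", "compliance"), ("audit", "compliance")]

def pvTagOrder : List String :=
  ["encryption", "authentication", "storage", "network", "compliance"]

-- `lowered.startswith(kw, i)` with 0 ≤ i ≤ len(lowered) is exactly
-- `PySem.Chars.startswith (lowered.drop i) kw.toList` (ported by hand; exact there).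
def extract_query_tags_alt (query : String) : List String :=
  let lowered := (PySem.Str.lower query).toList
  let found : PySem.Set String :=
    (List.range lowered.length).foldl
      (fun acc i => pvKeywordTags.foldl
        (fun a p => if PySem.Chars.startswith (lowered.drop i) p.1.toList
                    then PySem.Set.add a p.2 else a) acc)
      PySem.Set.empty
  pvTagOrder.filter (fun t => PySem.Set.contains found t)

-- ===== PRECONDITION & SPEC =====
def Spec_extract_query_tags (query : String) (out : List String) : Prop := out = extract_query_tags_alt query
instance (query : String) (out : List String) : Decidable (Spec_extract_query_tags query out) := by unfold Spec_extract_query_tags; infer_instance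

-- ===== CLAIM (what is proved, stated in full; the proofs are below) =====
def Claim_equal_extract_query_tags : Prop := ∀ (query : String), Dom_extract_query_tags query → Spec_extract_query_tags query (extract_query_tags query)

-- ===== LEMMAS AND PROOFS =====

-- membership in the inner (keyword-table) fold
lemma pv_mem_inner (cond : String × String → Bool) (tbl : List (String × String))
    (acc : PySem.Set String) (t : String) :
    t ∈ tbl.foldl (fun a p => if cond p then PySem.Set.add a p.2 else a) acc ↔
      t ∈ acc ∨ ∃ p ∈ tbl, cond p ∧ p.2 = t := by
  induction tbl generalizing acc with
  | nil => simp
  | cons hd tl ih =>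
    simp only [List.foldl_cons, ih]
    by_cases h : cond hd = true
    · simp only [h, if_true, PySem.Set.mem_add, List.mem_cons]
      constructor
      · rintro ((h1 | h1) | ⟨p, hp, hc, he⟩)
        · exact Or.inl h1
        · exact Or.inr ⟨hd, Or.inl rfl, h, h1.symm⟩
        · exact Or.inr ⟨p, Or.inr hp, hc, he⟩
      · rintro (h1 | ⟨p, hp | hp, hc, he⟩)
        · exact Or.inl (Or.inl h1)
        · exact Or.inl (Or.inr (hp ▸ he).symm)
        · exact Or.inr ⟨p, hp, hc, he⟩
    · simp only [h, if_false, List.mem_cons, Bool.false_eq_true]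
      constructor
      · rintro (h1 | ⟨p, hp, hc, he⟩)
        · exact Or.inl h1
        · exact Or.inr ⟨p, Or.inr hp, hc, he⟩
      · rintro (h1 | ⟨p, hp | hp, hc, he⟩)
        · exact Or.inl h1
        · exact absurd (hp ▸ hc) (by simp [h])
        · exact Or.inr ⟨p, hp, hc, he⟩

-- membership in the outer (position) fold
lemma pv_mem_outer (L : List Char) (idxs : List Nat) (acc : PySem.Set String) (t : String) :
    t ∈ idxs.foldl
        (fun acc i => pvKeywordTags.foldl
          (fun a p => if PySem.Chars.startswith (L.drop i) p.1.toList
                      then PySem.Set.add a p.2 else a) acc) acc ↔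
      t ∈ acc ∨ ∃ i ∈ idxs, ∃ p ∈ pvKeywordTags,
        PySem.Chars.startswith (L.drop i) p.1.toList ∧ p.2 = t := by
  induction idxs generalizing acc with
  | nil => simp
  | cons hd tl ih =>
    simp only [List.foldl_cons, ih, pv_mem_inner, List.mem_cons]
    constructor
    · rintro ((h | ⟨p, hp, hc, he⟩) | ⟨i, hi, p, hp, hc, he⟩)
      · exact Or.inl h
      · exact Or.inr ⟨hd, Or.inl rfl, p, hp, hc, he⟩
      · exact Or.inr ⟨i, Or.inr hi, p, hp, hc, he⟩
    · rintro (h | ⟨i, hi | hi, p, hp, hc, he⟩)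
      · exact Or.inl (Or.inl h)
      · exact Or.inl (Or.inr ⟨p, hp, hi ▸ hc, he⟩)
      · exact Or.inr ⟨i, hi, p, hp, hc, he⟩

-- bounded position scan of a nonempty keyword = Python's substring test
lemma pv_exists_pos_iff (L kw : List Char) (h : kw ≠ []) :
    (∃ i ∈ List.range L.length, kw <+: L.drop i) ↔ PySem.Chars.isIn kw L = true := by
  rw [← PySem.Chars.exists_prefix_drop_iff_isIn]
  constructor
  · rintro ⟨i, _, hp⟩; exact ⟨i, hp⟩
  · rintro ⟨j, hp⟩
    refine ⟨j, List.mem_range.mpr ?_, hp⟩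
    by_contra hj
    have : L.drop j = [] := List.drop_eq_nil_of_le (by omega)
    rw [this] at hp
    exact h (List.prefix_nil.mp hp)

set_option maxHeartbeats 1000000 in
theorem extract_query_tags_spec : Claim_equal_extract_query_tags := by
  intro q _
  unfold Spec_extract_query_tags
  show extract_query_tags q = extract_query_tags_alt q
  unfold extract_query_tags extract_query_tags_alt
  simp only [List.any_cons, List.any_nil, Bool.or_false, PySem.Str.isIn_eq]
  set L := (PySem.Str.lower q).toList with hL
  set F := (List.range L.length).foldl
      (fun acc i => pvKeywordTags.foldl
        (fun a p => if PySem.Chars.startswith (L.drop i) p.1.toList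
                    then PySem.Set.add a p.2 else a) acc) PySem.Set.empty with hF
  have hmem : ∀ t : String, t ∈ F ↔
      ∃ p ∈ pvKeywordTags, PySem.Chars.isIn p.1.toList L = true ∧ p.2 = t := by
    intro t
    rw [hF, pv_mem_outer]
    constructor
    · rintro (h | ⟨i, hi, p, hp, hc, he⟩)
      · simp [PySem.Set.empty] at h
      · refine ⟨p, hp, ?_, he⟩
        have hne : p.1.toList ≠ [] := by fin_cases hp <;> decide
        rw [← pv_exists_pos_iff L p.1.toList hne]
        exact ⟨i, hi, (PySem.Chars.startswith_iff _ _).mp hc⟩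
    · rintro ⟨p, hp, hc, he⟩
      have hne : p.1.toList ≠ [] := by fin_cases hp <;> decide
      obtain ⟨i, hi, hpre⟩ := (pv_exists_pos_iff L p.1.toList hne).mpr hc
      exact Or.inr ⟨i, hi, p, hp, (PySem.Chars.startswith_iff _ _).mpr hpre, he⟩
  have hcont : ∀ t : String, PySem.Set.contains F t =
      pvKeywordTags.any (fun p => PySem.Chars.isIn p.1.toList L && (p.2 == t)) := by
    intro t
    rw [Bool.eq_iff_iff, PySem.Set.contains_iff, hmem]
    simp only [List.any_eq_true, Bool.and_eq_true, beq_iff_eq]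
  simp only [pvTagOrder, List.filter, hcont, pvKeywordTags, List.any_cons, List.any_nil,
    Bool.or_false]
  simp only [show (("encryption":String) == "encryption") = true from rfl,
    show (("authentication":String) == "authentication") = true from rfl,
    show (("storage":String) == "storage") = true from rfl,
    show (("network":String) == "network") = true from rfl,
    show (("compliance":String) == "compliance") = true from rfl,
    show (("encryption":String) == "authentication") = false from rfl,
    show (("encryption":String) == "storage") = false from rfl,
    show (("encryption":String) == "network") = false from rfl,
    show (("encryption":String) == "compliance") = false from rfl,
    show (("authentication":String) == "encryption") = false from rfl,
    show (("authentication":String) == "storage") = false from rfl,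
    show (("authentication":String) == "network") = false from rfl,
    show (("authentication":String) == "compliance") = false from rfl,
    show (("storage":String) == "encryption") = false from rfl,
    show (("storage":String) == "authentication") = false from rfl,
    show (("storage":String) == "network") = false from rfl,
    show (("storage":String) == "compliance") = false from rfl,
    show (("network":String) == "encryption") = false from rfl,
    show (("network":String) == "authentication") = false from rfl,
    show (("network":String) == "storage") = false from rfl,
    show (("network":String) == "compliance") = false from rfl,
    show (("compliance":String) == "encryption") = false from rfl,
    show (("compliance":String) == "authentication") = false from rfl,
    show (("compliance":String) == "storage") = false from rfl,
    show (("compliance":String) == "network") = false from rfl,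
    Bool.and_true, Bool.and_false, Bool.false_or, Bool.or_false]
  generalize PySem.Chars.isIn "encrypt".toList L = b0
  generalize PySem.Chars.isIn "crypto".toList L = b1
  generalize PySem.Chars.isIn "key".toList L = b2
  generalize PySem.Chars.isIn "auth".toList L = b3
  generalize PySem.Chars.isIn "password".toList L = b4
  generalize PySem.Chars.isIn "login".toList L = b5
  generalize PySem.Chars.isIn "store".toList L = b6
  generalize PySem.Chars.isIn "retain".toList L = b7
  generalize PySem.Chars.isIn "database".toList L = b8
  generalize PySem.Chars.isIn "firewall".toList L = b9
  generalize PySem.Chars.isIn "network".toList L = b10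
  generalize PySem.Chars.isIn "router".toList L = b11
  generalize PySem.Chars.isIn "compliance".toList L = b12
  generalize PySem.Chars.isIn "audit".toList L = b13
  revert b0 b1 b2 b3 b4 b5 b6 b7 b8 b9 b10 b11 b12 b13
  decide
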